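-- pv_equiv track=rewrite | github.com/WuChaoli/my-company-plugin | skills/architecture-generator/scripts/analyze_dependencies.py | _split_folder_by_subfolder
-- ===== SOURCE A (Python) =====
-- from collections import defaultdict
-- from typing import Dict, List, Set, Tuple
--
-- def _split_folder_by_subfolder(files: List[str]) -> Dict[str, List[str]]:
--     """按子文件夹拆分文件列表"""
--     subfolders = defaultdict(list)
--
--     for file_path in files:
--         parts = file_path.split('/')
--         if len(parts) > 1:
--             # 使用第二层作为子文件夹名
--             subfolder = parts[1] if len(parts) > 1 else '.'
--         else:
--             subfolder = '.'
--         subfolders[subfolder].append(file_path)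
--
--     return dict(subfolders)
-- ===== SOURCE B (Python) =====
-- from typing import Dict, List
--
-- def _split_folder_by_subfolder(files: List[str]) -> Dict[str, List[str]]:
--     """Group file paths by second '/'-segment: dedup the keys once, then one filter pass per key."""
--     def key(path: str) -> str:
--         parts = path.split('/')
--         return parts[1] if len(parts) > 1 else '.'
--     keys = list(dict.fromkeys(key(f) for f in files))
--     return {k: [f for f in files if key(f) == k] for k in keys}
-- ===== Notes on version B (the rewrite author's own statement) =====
-- stated objective: alternative
-- what changed: Replaces the single-pass defaultdict bucketing with a two-phase plan: dedup the keys once in first-occurrence order, then build each group by an independent filter pass over the input.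
import Mathlib
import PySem

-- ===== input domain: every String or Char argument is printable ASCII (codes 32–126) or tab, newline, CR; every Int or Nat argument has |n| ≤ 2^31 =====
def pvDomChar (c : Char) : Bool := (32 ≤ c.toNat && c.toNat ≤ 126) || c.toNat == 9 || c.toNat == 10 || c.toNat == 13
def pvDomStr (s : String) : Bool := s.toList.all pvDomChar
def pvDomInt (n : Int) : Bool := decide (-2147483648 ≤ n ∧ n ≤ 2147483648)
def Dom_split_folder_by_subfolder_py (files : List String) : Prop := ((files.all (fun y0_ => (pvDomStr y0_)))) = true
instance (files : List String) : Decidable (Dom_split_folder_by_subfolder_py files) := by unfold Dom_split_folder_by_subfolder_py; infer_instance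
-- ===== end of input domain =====

-- B groups paths by their second '/'-segment with a dedup-keys pass plus one filter pass per key, instead of A's single-pass defaultdict bucketing; same return value.

-- ===== PORT A =====
def split_folder_by_subfolder_py (files : List String) : List (String × List String) :=
  (files.foldl (fun subfolders file_path =>
      -- parts = file_path.split('/') ; '/' is a nonempty literal so split? is always some
      let parts := (PySem.Str.split? file_path "/").getD []
      let subfolder := if parts.length > 1 then (if parts.length > 1 then PySem.List.pyGetD parts 1 "" else ".") else "."
      -- defaultdict(list): subfolders[subfolder].append(file_path)
      PySem.Dict.modify subfolders subfolder [] (fun l => l ++ [file_path]))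
    PySem.Dict.empty).items

-- ===== PORT B =====
-- key(path) = parts[1] if path splits into more than one '/'-segment, else '.'
def pvKey (path : String) : String :=
  let parts := (PySem.Str.split? path "/").getD []
  if parts.length > 1 then PySem.List.pyGetD parts 1 "" else "."

def split_folder_by_subfolder_py_alt (files : List String) : List (String × List String) :=
  -- keys = list(dict.fromkeys(key(f) for f in files)); {k: [f for f in files if key(f) == k] for k in keys}
  (PySem.List.dedup (files.map pvKey)).map
    (fun k => (k, files.filter (fun f => pvKey f == k)))

-- ===== PRECONDITION & SPEC =====
def Spec_split_folder_by_subfolder_py (files : List String) (out : List (String × List String)) : Prop := out = split_folder_by_subfolder_py_alt files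
instance (files : List String) (out : List (String × List String)) : Decidable (Spec_split_folder_by_subfolder_py files out) := by unfold Spec_split_folder_by_subfolder_py; infer_instance

-- ===== CLAIM (what is proved, stated in full; the proofs are below) =====
def Claim_equal_split_folder_by_subfolder_py : Prop := ∀ (files : List String), Dom_split_folder_by_subfolder_py files → Spec_split_folder_by_subfolder_py files (split_folder_by_subfolder_py files)

-- ===== LEMMAS AND PROOFS =====

-- ordered dedup of a snoc: the new element is kept iff it is new
theorem pv_dedup_snoc {α : Type} [BEq α] [LawfulBEq α] (ys : List α) (y : α) :
    PySem.List.dedup (ys ++ [y]) =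
      if y ∈ ys then PySem.List.dedup ys else PySem.List.dedup ys ++ [y] := by
  show PySem.Set.ofList (ys ++ [y]) = _
  rw [PySem.Set.ofList, List.foldl_append, List.foldl_cons, List.foldl_nil]
  rw [show List.foldl PySem.Set.add PySem.Set.empty ys = PySem.Set.ofList ys from rfl]
  rw [PySem.Set.add_eq_ite]
  simp [PySem.Set.mem_ofList, PySem.List.dedup]

-- loop invariant: A's bucketing dict, as an item list, is B's dedup-keys-then-filter table
theorem pv_loop (l : List String) :
    (l.foldl (fun d f => PySem.Dict.modify d (pvKey f) [] (fun v => v ++ [f])) PySem.Dict.empty).items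
      = (PySem.List.dedup (l.map pvKey)).map (fun k => (k, l.filter (fun f => pvKey f == k))) := by
  induction l using List.reverseRecOn with
  | nil => rfl
  | append_singleton l x ih =>
    rw [List.foldl_append, List.foldl_cons, List.foldl_nil]
    have hd : l.foldl (fun d f => PySem.Dict.modify d (pvKey f) [] (fun v => v ++ [f])) PySem.Dict.empty
        = ⟨(PySem.List.dedup (l.map pvKey)).map (fun k => (k, l.filter (fun f => pvKey f == k)))⟩ := by
      cases hE : l.foldl (fun d f => PySem.Dict.modify d (pvKey f) [] (fun v => v ++ [f])) PySem.Dict.empty with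
      | mk its =>
        have h2 := ih
        rw [hE] at h2
        exact congrArg PySem.Dict.mk h2
    rw [hd]
    have hkeys : (PySem.Dict.mk ((PySem.List.dedup (l.map pvKey)).map
        (fun k => (k, l.filter (fun f => pvKey f == k))))).keys = PySem.List.dedup (l.map pvKey) := by
      simp [PySem.Dict.keys, List.map_map, Function.comp_def]
    have hnodupK : (PySem.List.dedup (l.map pvKey)).Nodup := PySem.Set.nodup_ofList _
    rw [show List.map pvKey (l ++ [x]) = List.map pvKey l ++ [pvKey x] by simp]
    rw [pv_dedup_snoc]
    by_cases hmem : pvKey x ∈ l.map pvKey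
    · -- key already present: insert replaces the pair in place
      have hmemK : pvKey x ∈ PySem.List.dedup (l.map pvKey) :=
        (PySem.Set.mem_ofList _ _).mpr hmem
      have hcont : (PySem.Dict.mk ((PySem.List.dedup (l.map pvKey)).map
          (fun k => (k, l.filter (fun f => pvKey f == k))))).contains (pvKey x) = true := by
        rw [PySem.Dict.contains_iff_mem_keys, hkeys]; exact hmemK
      have hget : (PySem.Dict.mk ((PySem.List.dedup (l.map pvKey)).map
          (fun k => (k, l.filter (fun f => pvKey f == k))))).get? (pvKey x)
            = some (l.filter (fun f => pvKey f == pvKey x)) := by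
        apply PySem.Dict.get?_of_mem_items
        · exact List.mem_map_of_mem hmemK
        · rw [hkeys]; exact hnodupK
      simp only [PySem.Dict.modify, PySem.Dict.getD, hget, Option.getD_some]
      rw [PySem.Dict.items_insert_of_contains _ _ hcont]
      rw [if_pos hmem, List.map_map]
      apply List.map_congr_left
      intro k hk
      by_cases hke : k = pvKey x
      · subst hke
        simp [List.filter_append]
      · have h2 : (pvKey x == k) = false := by simp [Ne.symm hke]
        simp [List.filter_append, h2]
        exact fun h => absurd h hke
    · -- new key: insert appends, and the new group is just [x]
      have hmemK : pvKey x ∉ PySem.List.dedup (l.map pvKey) := fun h =>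
        hmem ((PySem.Set.mem_ofList _ _).mp h)
      have hcont : (PySem.Dict.mk ((PySem.List.dedup (l.map pvKey)).map
          (fun k => (k, l.filter (fun f => pvKey f == k))))).contains (pvKey x) = false := by
        rw [Bool.eq_false_iff]
        intro h
        exact hmemK (by rw [← hkeys]; exact (PySem.Dict.contains_iff_mem_keys _ _).mp h)
      simp only [PySem.Dict.modify]
      rw [PySem.Dict.getD_of_not_contains _ _ hcont]
      rw [PySem.Dict.items_insert_of_not_contains _ _ hcont]
      rw [if_neg hmem, List.map_append, List.map_singleton]
      congr 1
      · apply List.map_congr_left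
        intro k hk
        have hkne : pvKey x ≠ k := fun h => hmemK (h ▸ hk)
        have h2 : (pvKey x == k) = false := by simp [hkne]
        simp [List.filter_append, h2]
      · have hfl : l.filter (fun f => pvKey f == pvKey x) = [] := by
          rw [List.filter_eq_nil_iff]
          intro f hf
          simp only [beq_iff_eq]
          intro h
          exact hmem (h ▸ List.mem_map_of_mem hf)
        simp [List.filter_append, hfl]

-- A's inline subfolder expression is B's key function
theorem pv_step_eq :
    (fun (subfolders : PySem.Dict String (List String)) (file_path : String) =>
        let parts := (PySem.Str.split? file_path "/").getD []
        let subfolder := if parts.length > 1 then (if parts.length > 1 then PySem.List.pyGetD parts 1 "" else ".") else "."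
        PySem.Dict.modify subfolders subfolder [] (fun l => l ++ [file_path]))
      = fun d f => PySem.Dict.modify d (pvKey f) [] (fun v => v ++ [f]) := by
  funext d f
  by_cases h : ((PySem.Str.split? f "/").getD []).length > 1 <;> simp [pvKey, h]

-- ===== VERDICT (by name: the statement is the Claim_ definition above) =====
theorem split_folder_by_subfolder_py_spec : Claim_equal_split_folder_by_subfolder_py := by
  intro files _
  unfold Spec_split_folder_by_subfolder_py split_folder_by_subfolder_py split_folder_by_subfolder_py_alt
  rw [pv_step_eq]
  exact pv_loop files
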